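-- pv_equiv track=rewrite | github.com/vikramnitin9/translation_gym | compute_C_metrics_after.py | parse_metrics_output
-- ===== SOURCE A (Python) =====
-- def parse_metrics_output(output: str):
--     stats = {k: 0 for k in ['pointerDecls','pointerDerefs','casts','calls','unsafeLines']}
--     for line in output.splitlines():
--         line = line.strip()
--         for key in stats:
--             if line.startswith(f"{key}:"):
--                 try:
--                     stats[key] += int(line.split(':',1)[1].strip())
--                 except ValueError:
--                     pass
--     return stats
-- ===== SOURCE B (Python) =====
-- def _values(key, lines):
--     prefix = key + ':'
--     for line in lines:
--         if line.startswith(prefix):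
--             try:
--                 yield int(line[len(prefix):].strip())
--             except ValueError:
--                 pass
--
-- def parse_metrics_output(output: str):
--     lines = [l.strip() for l in output.splitlines()]
--     return {k: sum(_values(k, lines))
--             for k in ['pointerDecls','pointerDerefs','casts','calls','unsafeLines']}
-- ===== Notes on version B (the rewrite author's own statement) =====
-- stated objective: alternative
-- what changed: B inverts the loop nesting: instead of one pass over lines that mutates a stats dict by testing every key per line, B strips the lines once and then, per key, sums a generator of the parsed values of that key's matching lines, building the result dict in a single comprehension with no mutation.
import Mathlib
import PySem

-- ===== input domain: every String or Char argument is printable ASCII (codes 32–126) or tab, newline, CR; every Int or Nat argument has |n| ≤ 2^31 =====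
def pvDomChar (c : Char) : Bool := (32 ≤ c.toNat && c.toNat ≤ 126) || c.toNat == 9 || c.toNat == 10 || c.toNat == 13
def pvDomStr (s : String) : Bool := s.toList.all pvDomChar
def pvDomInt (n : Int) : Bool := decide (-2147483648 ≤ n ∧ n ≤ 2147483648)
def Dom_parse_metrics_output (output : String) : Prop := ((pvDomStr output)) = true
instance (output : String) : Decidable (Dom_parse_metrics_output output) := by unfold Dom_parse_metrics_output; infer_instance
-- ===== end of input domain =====

-- B inverts the loop nesting: it strips the lines once, then per key sums the parsed values of that key's matching lines and builds the dict in one comprehension with no mutation; same return value.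

-- ===== PORT A =====
-- the five metric keys, in A's dict-literal insertion order
def pvKeys : List String := ["pointerDecls", "pointerDerefs", "casts", "calls", "unsafeLines"]

def pvInit : PySem.Dict String Int :=
  PySem.Dict.ofList (pvKeys.map (fun k => (k, 0)))

-- A's inner-loop body for one (line, key): if line.startswith(key+":"): try stats[key] += int(line.split(':',1)[1].strip()) except ValueError: pass
def pvStepA (st : PySem.Dict String Int) (line : String) (key : String) : PySem.Dict String Int :=
  if PySem.Str.startswith line (key ++ ":") then
    match PySem.List.pyGet? ((PySem.Str.splitMax? line ":" 1).getD []) 1 with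
    | some tail =>
      match PySem.Int.ofStr? (PySem.Str.strip tail) with
      | some n => st.modify key 0 (· + n)
      | none => st          -- except ValueError: pass
    | none => st            -- unreachable: startswith guarantees a ':' in line
  else st

-- A's outer-loop body for one raw line
def pvLineA (stats : PySem.Dict String Int) (rawline : String) : PySem.Dict String Int :=
  let line := PySem.Str.strip rawline
  stats.keys.foldl (fun st key => pvStepA st line key) stats

def parse_metrics_output (output : String) : List (String × Int) :=
  ((PySem.Str.splitlines output).foldl pvLineA pvInit).items

-- ===== PORT B =====
-- one generator step of _values: if line.startswith(prefix): try yield int(line[len(prefix):].strip()) except ValueError: pass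
def pvValStep (pre : String) (acc : List Int) (line : String) : List Int :=
  if PySem.Str.startswith line pre then
    match PySem.Int.ofStr? (PySem.Str.strip (PySem.Str.slice line (some (PySem.Str.len pre)) none)) with
    | some n => acc ++ [n]
    | none => acc           -- except ValueError: pass
  else acc

-- the list of values the generator _values(key, lines) yields
def pvValues (key : String) (lines : List String) : List Int :=
  lines.foldl (pvValStep (key ++ ":")) []

def parse_metrics_output_alt (output : String) : List (String × Int) :=
  let lines := (PySem.Str.splitlines output).map PySem.Str.strip
  (PySem.Dict.ofList (pvKeys.map (fun k => (k, (pvValues k lines).sum)))).items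

-- ===== PRECONDITION & SPEC =====
def Spec_parse_metrics_output (output : String) (out : List (String × Int)) : Prop := out = parse_metrics_output_alt output
instance (output : String) (out : List (String × Int)) : Decidable (Spec_parse_metrics_output output out) := by unfold Spec_parse_metrics_output; infer_instance

-- ===== CLAIM =====
def Claim_equal_parse_metrics_output : Prop := ∀ (output : String), Dom_parse_metrics_output output → Spec_parse_metrics_output output (parse_metrics_output output)

-- ===== LEMMAS AND PROOFS =====

-- the dict state always has exactly the five keys, in order, with some values
def pvD (a b c d e : Int) : PySem.Dict String Int :=
  ⟨[("pointerDecls", a), ("pointerDerefs", b), ("casts", c), ("calls", d), ("unsafeLines", e)]⟩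

theorem pvInit_eq : pvInit = pvD 0 0 0 0 0 := rfl

theorem pvD_keys (a b c d e : Int) : (pvD a b c d e).keys = pvKeys := by
  simp [pvD, pvKeys, PySem.Dict.keys]

-- A's contribution of one (already stripped) line to one key's counter
def pvCA (key line : String) : Int :=
  if PySem.Str.startswith line (key ++ ":") then
    (((PySem.List.pyGet? ((PySem.Str.splitMax? line ":" 1).getD []) 1).bind
        (fun tail => PySem.Int.ofStr? (PySem.Str.strip tail))).getD 0)
  else 0

-- B's contribution of one (already stripped) line to one key's sum
def pvCB (key line : String) : Int :=
  if PySem.Str.startswith line (key ++ ":") then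
    ((PySem.Int.ofStr? (PySem.Str.strip (PySem.Str.slice line (some (PySem.Str.len (key ++ ":"))) none))).getD 0)
  else 0

-- split a char list at its first ':' (helper for characterising split(':', 1))
def pvSplitFirst : List Char → List Char × Option (List Char)
  | [] => ([], none)
  | c :: t =>
    if c = ':' then ([], some t)
    else (c :: (pvSplitFirst t).1, (pvSplitFirst t).2)

theorem pvSplitFirst_append (h t : List Char) (hh : ':' ∉ h) :
    pvSplitFirst (h ++ ':' :: t) = (h, some t) := by
  induction h with
  | nil => simp [pvSplitFirst]
  | cons c h' ih =>
    rw [List.mem_cons] at hh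
    push Not at hh
    have hc : c ≠ ':' := fun m => hh.1 m.symm
    simp [pvSplitFirst, hc, ih hh.2]

theorem pvGo0 (fuel : ℕ) (t : List Char) (acc : List (List Char)) (hf : 0 < fuel) :
    PySem.Chars.splitOnMax.go [':'] fuel 0 t [] acc = (t :: acc).reverse := by
  cases fuel with
  | zero => omega
  | succ n => cases t <;> rw [PySem.Chars.splitOnMax.go] <;> simp

theorem pvGo1 : ∀ (fuel : ℕ) (s cur : List Char) (acc : List (List Char)), s.length < fuel →
    PySem.Chars.splitOnMax.go [':'] fuel 1 s cur acc =
      (match pvSplitFirst s with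
       | (h, none) => ((cur.reverse ++ h) :: acc).reverse
       | (h, some t) => (t :: (cur.reverse ++ h) :: acc).reverse) := by
  intro fuel
  induction fuel with
  | zero => intro s cur acc hf; omega
  | succ n ih =>
    intro s cur acc hf
    cases s with
    | nil =>
      rw [PySem.Chars.splitOnMax.go]
      simp [pvSplitFirst]
      try omega
    | cons c rest =>
      by_cases hc : c = ':'
      · rw [PySem.Chars.splitOnMax.go]
        simp only [List.length_cons] at hf
        simp [hc, List.isPrefixOf, pvSplitFirst, pvGo0 n rest (cur.reverse :: acc) (by omega)]
      · rw [PySem.Chars.splitOnMax.go]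
        simp only [List.length_cons] at hf
        have hpre : ([':'].isPrefixOf (c :: rest)) = false := by
          simp [List.isPrefixOf]
          exact fun hcc => (hc hcc.symm).elim
        rw [ih rest (c :: cur) acc (by omega)] at *
        rcases hsf : pvSplitFirst rest with ⟨h', r⟩
        cases r <;> simp [pvSplitFirst, hc, hsf, hpre]

theorem pvSplit1 (s : List Char) :
    PySem.Chars.splitOnMax s [':'] 1 =
      (match pvSplitFirst s with
       | (h, none) => [h]
       | (h, some t) => [h, t]) := by
  have h0 : PySem.Chars.splitOnMax s [':'] 1 = PySem.Chars.splitOnMax.go [':'] (s.length + 1) 1 s [] [] := by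
    simp [PySem.Chars.splitOnMax]
  rw [h0, pvGo1 (s.length + 1) s [] [] (by omega)]
  rcases hsf : pvSplitFirst s with ⟨h, r⟩
  cases r <;> simp

theorem pvParts (s : String) :
    (PySem.Str.splitMax? s ":" 1).getD [] =
      (match pvSplitFirst s.toList with
       | (h, none) => [String.ofList h]
       | (h, some t) => [String.ofList h, String.ofList t]) := by
  have h1 : PySem.Str.splitMax? s ":" 1 = some (List.map String.ofList (PySem.Chars.splitOnMax s.toList [':'] 1)) := by
    simp [PySem.Str.splitMax?, PySem.Chars.splitMax?]
  rw [h1, pvSplit1 s.toList]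
  rcases hsf : pvSplitFirst s.toList with ⟨h, r⟩
  cases r <;> simp

-- the two per-line contributions agree for a colon-free key
theorem pvC_eq (key : String) (hk : ':' ∉ key.toList) (line : String) :
    pvCA key line = pvCB key line := by
  unfold pvCA pvCB
  by_cases hs : PySem.Str.startswith line (key ++ ":")
  · simp only [hs, if_true]
    have hpre : (key ++ ":").toList <+: line.toList := by
      have := (PySem.Chars.startswith_iff line.toList (key ++ ":").toList).mp (by simpa [PySem.Str.startswith] using hs)
      exact this
    obtain ⟨t, ht⟩ := hpre
    have hkl : (key ++ ":").toList = key.toList ++ [':'] := by simp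
    have hline : line.toList = key.toList ++ ':' :: t := by
      rw [← ht, hkl]; simp
    -- A side: split(':',1)[1] = t
    have hA : (PySem.Str.splitMax? line ":" 1).getD [] = [String.ofList key.toList, String.ofList t] := by
      rw [pvParts line, hline, pvSplitFirst_append key.toList t hk]
    -- B side: line[len(key+':'):] = t
    have hB : (PySem.Str.slice line (some (PySem.Str.len (key ++ ":"))) none).toList = t := by
      rw [PySem.Str.toList_slice, PySem.Chars.slice_eq_listSlice]
      have hlen : PySem.Str.len (key ++ ":") = ((key.toList.length + 1 : ℕ) : ℤ) := by
        simp [PySem.Str.len, hkl]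
      rw [hlen, PySem.List.slice_from_natCast, hline]
      have : key.toList ++ ':' :: t = (key.toList ++ [':']) ++ t := by simp
      rw [this, show key.toList.length + 1 = (key.toList ++ [':']).length by simp, List.drop_left]
    have hget : PySem.List.pyGet? [String.ofList key.toList, String.ofList t] 1 = some (String.ofList t) := by
      simp [PySem.List.pyGet?, PySem.List.pyIdx?]
    have htl : (PySem.Str.strip (String.ofList t)).toList = (PySem.Str.strip (PySem.Str.slice line (some (PySem.Str.len (key ++ ":"))) none)).toList := by
      rw [PySem.Str.toList_strip, PySem.Str.toList_strip, String.toList_ofList, hB]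
    have hofs : PySem.Int.ofStr? (PySem.Str.strip (String.ofList t)) =
        PySem.Int.ofStr? (PySem.Str.strip (PySem.Str.slice line (some (PySem.Str.len (key ++ ":"))) none)) := by
      simp [PySem.Int.ofStr?, htl]
    rw [hA, hget, Option.bind_some, hofs]
  · rw [Bool.not_eq_true] at hs
    simp only [hs, Bool.false_eq_true, if_false]

-- A's per-key step only touches that key's slot, adding pvCA
theorem pvStepA1 (a b c d e : Int) (line : String) :
    pvStepA (pvD a b c d e) line "pointerDecls" = pvD (a + pvCA "pointerDecls" line) b c d e := by
  unfold pvStepA pvCA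
  by_cases hs : PySem.Str.startswith line ("pointerDecls" ++ ":")
  · simp only [hs, if_true]
    split
    · rename_i tail hp
      simp only [hp, Option.bind_some]
      split
      · rename_i n hv
        simp only [hv, Option.getD_some]
        simp [pvD, PySem.Dict.modify, PySem.Dict.insert, PySem.Dict.getD, PySem.Dict.get?]
      · rename_i hv
        simp only [hv, Option.getD_none]
        simp [pvD]
    · rename_i hp
      simp only [hp, Option.bind_none, Option.getD_none]
      simp [pvD]
  · rw [Bool.not_eq_true] at hs
    simp only [hs, Bool.false_eq_true, if_false]
    simp [pvD]

theorem pvStepA2 (a b c d e : Int) (line : String) :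
    pvStepA (pvD a b c d e) line "pointerDerefs" = pvD a (b + pvCA "pointerDerefs" line) c d e := by
  unfold pvStepA pvCA
  by_cases hs : PySem.Str.startswith line ("pointerDerefs" ++ ":")
  · simp only [hs, if_true]
    split
    · rename_i tail hp
      simp only [hp, Option.bind_some]
      split
      · rename_i n hv
        simp only [hv, Option.getD_some]
        simp [pvD, PySem.Dict.modify, PySem.Dict.insert, PySem.Dict.getD, PySem.Dict.get?]
      · rename_i hv
        simp only [hv, Option.getD_none]
        simp [pvD]
    · rename_i hp
      simp only [hp, Option.bind_none, Option.getD_none]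
      simp [pvD]
  · rw [Bool.not_eq_true] at hs
    simp only [hs, Bool.false_eq_true, if_false]
    simp [pvD]

theorem pvStepA3 (a b c d e : Int) (line : String) :
    pvStepA (pvD a b c d e) line "casts" = pvD a b (c + pvCA "casts" line) d e := by
  unfold pvStepA pvCA
  by_cases hs : PySem.Str.startswith line ("casts" ++ ":")
  · simp only [hs, if_true]
    split
    · rename_i tail hp
      simp only [hp, Option.bind_some]
      split
      · rename_i n hv
        simp only [hv, Option.getD_some]
        simp [pvD, PySem.Dict.modify, PySem.Dict.insert, PySem.Dict.getD, PySem.Dict.get?]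
      · rename_i hv
        simp only [hv, Option.getD_none]
        simp [pvD]
    · rename_i hp
      simp only [hp, Option.bind_none, Option.getD_none]
      simp [pvD]
  · rw [Bool.not_eq_true] at hs
    simp only [hs, Bool.false_eq_true, if_false]
    simp [pvD]

theorem pvStepA4 (a b c d e : Int) (line : String) :
    pvStepA (pvD a b c d e) line "calls" = pvD a b c (d + pvCA "calls" line) e := by
  unfold pvStepA pvCA
  by_cases hs : PySem.Str.startswith line ("calls" ++ ":")
  · simp only [hs, if_true]
    split
    · rename_i tail hp
      simp only [hp, Option.bind_some]
      split
      · rename_i n hv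
        simp only [hv, Option.getD_some]
        simp [pvD, PySem.Dict.modify, PySem.Dict.insert, PySem.Dict.getD, PySem.Dict.get?]
      · rename_i hv
        simp only [hv, Option.getD_none]
        simp [pvD]
    · rename_i hp
      simp only [hp, Option.bind_none, Option.getD_none]
      simp [pvD]
  · rw [Bool.not_eq_true] at hs
    simp only [hs, Bool.false_eq_true, if_false]
    simp [pvD]

theorem pvStepA5 (a b c d e : Int) (line : String) :
    pvStepA (pvD a b c d e) line "unsafeLines" = pvD a b c d (e + pvCA "unsafeLines" line) := by
  unfold pvStepA pvCA
  by_cases hs : PySem.Str.startswith line ("unsafeLines" ++ ":")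
  · simp only [hs, if_true]
    split
    · rename_i tail hp
      simp only [hp, Option.bind_some]
      split
      · rename_i n hv
        simp only [hv, Option.getD_some]
        simp [pvD, PySem.Dict.modify, PySem.Dict.insert, PySem.Dict.getD, PySem.Dict.get?]
      · rename_i hv
        simp only [hv, Option.getD_none]
        simp [pvD]
    · rename_i hp
      simp only [hp, Option.bind_none, Option.getD_none]
      simp [pvD]
  · rw [Bool.not_eq_true] at hs
    simp only [hs, Bool.false_eq_true, if_false]
    simp [pvD]

-- one raw line: A's inner loop adds each key's contribution of the stripped line
theorem pvLineA_eq (a b c d e : Int) (raw : String) :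
    pvLineA (pvD a b c d e) raw =
      pvD (a + pvCA "pointerDecls" (PySem.Str.strip raw))
          (b + pvCA "pointerDerefs" (PySem.Str.strip raw))
          (c + pvCA "casts" (PySem.Str.strip raw))
          (d + pvCA "calls" (PySem.Str.strip raw))
          (e + pvCA "unsafeLines" (PySem.Str.strip raw)) := by
  unfold pvLineA
  rw [pvD_keys]
  simp only [pvKeys, List.foldl_cons, List.foldl_nil,
    pvStepA1, pvStepA2, pvStepA3, pvStepA4, pvStepA5]

-- A's whole fold: each slot ends at its start value plus the sum of contributions
theorem pvFoldA (lines : List String) : ∀ (a b c d e : Int),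
    lines.foldl pvLineA (pvD a b c d e) =
      pvD (a + (lines.map (fun r => pvCA "pointerDecls" (PySem.Str.strip r))).sum)
          (b + (lines.map (fun r => pvCA "pointerDerefs" (PySem.Str.strip r))).sum)
          (c + (lines.map (fun r => pvCA "casts" (PySem.Str.strip r))).sum)
          (d + (lines.map (fun r => pvCA "calls" (PySem.Str.strip r))).sum)
          (e + (lines.map (fun r => pvCA "unsafeLines" (PySem.Str.strip r))).sum) := by
  induction lines with
  | nil => intro a b c d e; simp
  | cons l ls ih =>
    intro a b c d e
    rw [List.foldl_cons, pvLineA_eq, ih]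
    simp [add_assoc]

-- B's generator: the sum of the yielded values is the sum of per-line contributions
theorem pvValStep_sum (key : String) (lines : List String) : ∀ (acc : List Int),
    (lines.foldl (pvValStep (key ++ ":")) acc).sum = acc.sum + (lines.map (pvCB key)).sum := by
  induction lines with
  | nil => intro acc; simp
  | cons l ls ih =>
    intro acc
    rw [List.foldl_cons, ih]
    simp only [List.map_cons, List.sum_cons]
    unfold pvValStep pvCB
    by_cases hs : PySem.Str.startswith l (key ++ ":")
    · simp only [hs, if_true]
      split
      · rename_i n hv
        simp only [hv, Option.getD_some, List.sum_append, List.sum_cons, List.sum_nil]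
        ring
      · rename_i hv
        simp only [hv, Option.getD_none]
        ring
    · simp only [hs, if_false, Bool.false_eq_true]; ring

theorem pvValues_sum (key : String) (lines : List String) :
    (pvValues key lines).sum = (lines.map (pvCB key)).sum := by
  unfold pvValues
  rw [pvValStep_sum]
  simp

-- packaging: building the dict comprehension over the five distinct keys keeps them in order
theorem pvOfList_items (v1 v2 v3 v4 v5 : Int) :
    (PySem.Dict.ofList [("pointerDecls", v1), ("pointerDerefs", v2), ("casts", v3), ("calls", v4), ("unsafeLines", v5)]).items =
      [("pointerDecls", v1), ("pointerDerefs", v2), ("casts", v3), ("calls", v4), ("unsafeLines", v5)] := by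
  rfl

-- ===== VERDICT (by name: the statement is the Claim_ definition above) =====
theorem parse_metrics_output_spec : Claim_equal_parse_metrics_output := by
  intro output _
  unfold Spec_parse_metrics_output parse_metrics_output parse_metrics_output_alt
  rw [pvInit_eq, pvFoldA]
  simp only [pvKeys, List.map_cons, List.map_nil, pvValues_sum, List.map_map,
    Function.comp_def, zero_add]
  rw [pvOfList_items]
  simp only [pvD]
  have hC : ∀ key : String, ':' ∉ key.toList →
      ((PySem.Str.splitlines output).map (fun r => pvCB key (PySem.Str.strip r))).sum =
      ((PySem.Str.splitlines output).map (fun r => pvCA key (PySem.Str.strip r))).sum := by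
    intro key hk
    exact congrArg List.sum
      (List.map_congr_left (fun r _ => (pvC_eq key hk (PySem.Str.strip r)).symm))
  rw [hC "pointerDecls" (by decide), hC "pointerDerefs" (by decide), hC "casts" (by decide),
      hC "calls" (by decide), hC "unsafeLines" (by decide)]
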